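-- pv_equiv track=rewrite | github.com/foojanbabaeeian/CodingMinds | USACO/USACOSilver/Allen/Binary search/Binary.py | min_max_waiting
-- ===== SOURCE A (Python) =====
-- def cows(arrivals, M, C, W):
--     bus = 1
--     first_cow = arrivals[0]
--     cow_in_bus = 0
--     for cow in arrivals:
--         if cow_in_bus < C and cow - first_cow <= W:
--             cow_in_bus += 1
--         else:
--             bus +=1
--             cow_in_bus = 1
--             first_cow= cow
--
--         if bus > M:
--             return False
--
--     return True
--
-- def min_max_waiting(N, M, C, arrivals):
--     arrivals.sort()
--     low = 0
--     high = max(arrivals) - min(arrivals)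
--     while low < high:
--         mid = (high + low) //2
--         if cows(arrivals, M, C, mid):
--             high = mid
--         else:
--             low = mid + 1
--     return low
-- ===== SOURCE B (Python) =====
-- def _fits(arrivals, M, C, W):
--     # partition the sorted arrivals bus-by-bus: each bus takes the first
--     # remaining cow, then further cows while capacity and the window allow
--     buses = 0
--     rest = arrivals
--     while rest:
--         buses += 1
--         if buses > M:
--             return False
--         limit = rest[0] + W
--         k = 1
--         while k < len(rest) and k < C and rest[k] <= limit:
--             k += 1
--         rest = rest[k:]
--     return True
--
--
-- def min_max_waiting(N, M, C, arrivals):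
--     arrivals.sort()
--     # every achievable answer is a difference of two arrivals: collect the
--     # distinct candidate values and binary-search the sorted candidate list
--     # for the smallest feasible one
--     diffs = set()
--     rest = arrivals
--     while rest:
--         a = rest[0]
--         for b in rest:
--             diffs.add(b - a)
--         rest = rest[1:]
--     cands = sorted(diffs)
--     lo, hi = 0, len(cands) - 1
--     while lo < hi:
--         mid = (lo + hi) // 2
--         if _fits(arrivals, M, C, cands[mid]):
--             hi = mid
--         else:
--             lo = mid + 1
--     return cands[lo]
-- ===== Notes on version B (the rewrite author's own statement) =====
-- stated objective: alternative
-- what changed: The integer-range binary search with a cow-by-cow feasibility state machine is replaced by enumerating the distinct candidate answers (all pairwise differences of the sorted arrivals) and binary-searching that sorted candidate list for the smallest feasible value, feasibility being a bus-by-bus partition count.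
-- outside the precondition, e.g. on min_max_waiting(2, 2, 0, [0, 5]): A returns 5, B returns 0
import Mathlib
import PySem

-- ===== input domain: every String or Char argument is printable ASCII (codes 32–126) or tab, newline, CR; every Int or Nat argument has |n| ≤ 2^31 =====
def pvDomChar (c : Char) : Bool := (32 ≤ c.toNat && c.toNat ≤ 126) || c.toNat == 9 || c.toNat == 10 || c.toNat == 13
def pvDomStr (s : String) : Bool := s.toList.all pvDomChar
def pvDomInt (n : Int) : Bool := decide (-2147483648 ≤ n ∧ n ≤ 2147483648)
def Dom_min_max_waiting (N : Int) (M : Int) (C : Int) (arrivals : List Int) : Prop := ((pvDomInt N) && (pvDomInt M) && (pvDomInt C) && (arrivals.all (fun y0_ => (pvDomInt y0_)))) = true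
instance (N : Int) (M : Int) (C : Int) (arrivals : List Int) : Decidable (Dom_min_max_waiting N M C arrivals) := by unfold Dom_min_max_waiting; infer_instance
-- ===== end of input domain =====

-- B replaces A's integer-range binary search with cow-by-cow feasibility by a binary search over
-- the sorted list of candidate answers (pairwise differences), feasibility counted bus-by-bus
-- (objective: alternative). Both Pythons sort `arrivals` in place; the equivalence proved here is
-- about the return value.

-- midpoint bounds, cited by the termination proofs of the binary-search loops below
theorem pvMid_ge (low high : Int) (h : low < high) :
    low ≤ PySem.Int.floordiv (high + low) 2 := by
  rw [PySem.Int.le_floordiv_iff_mul_le (by norm_num : (0:Int) < 2)]; omega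

theorem pvMid_lt (low high : Int) (h : low < high) :
    PySem.Int.floordiv (high + low) 2 < high := by
  rw [PySem.Int.floordiv_lt_iff_lt_mul (by norm_num : (0:Int) < 2)]; omega

theorem pvMid_ge' (lo hi : Int) (h : lo < hi) :
    lo ≤ PySem.Int.floordiv (lo + hi) 2 := by
  rw [Int.add_comm]; exact pvMid_ge lo hi h

theorem pvMid_lt' (lo hi : Int) (h : lo < hi) :
    PySem.Int.floordiv (lo + hi) 2 < hi := by
  rw [Int.add_comm]; exact pvMid_lt lo hi h

-- ===== PORT A =====
-- the for-loop of `cows`, state (bus, first_cow, cow_in_bus); early `return False` ≙ the if-branches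
def pvCowsLoop (M C W : Int) : List Int → Int → Int → Int → Bool
  | [], _, _, _ => true
  | cow :: rest, bus, first, inb =>
    if inb < C ∧ cow - first ≤ W then
      if bus > M then false else pvCowsLoop M C W rest bus first (inb + 1)
    else
      if bus + 1 > M then false else pvCowsLoop M C W rest (bus + 1) cow 1

def pvCows (arrivals : List Int) (M C W : Int) : Bool :=
  pvCowsLoop M C W arrivals 1 ((PySem.List.pyGet? arrivals 0).getD 0) 0

-- the `while low < high` binary search of A
def pvBsearchA (arrivals : List Int) (M C low high : Int) : Int :=
  if h : low < high then
    if pvCows arrivals M C (PySem.Int.floordiv (high + low) 2) then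
      pvBsearchA arrivals M C low (PySem.Int.floordiv (high + low) 2)
    else
      pvBsearchA arrivals M C (PySem.Int.floordiv (high + low) 2 + 1) high
  else low
termination_by (high - low).toNat
decreasing_by
  · have h1 := pvMid_ge low high h; have h2 := pvMid_lt low high h; omega
  · have h1 := pvMid_ge low high h; have h2 := pvMid_lt low high h; omega

def min_max_waiting (N : Int) (M : Int) (C : Int) (arrivals : List Int) : Int :=
  let s := PySem.List.sorted arrivals (fun x => x)
  pvBsearchA s M C 0
    (((PySem.List.max? s (fun x => x)).getD 0) - ((PySem.List.min? s (fun x => x)).getD 0))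

-- ===== PORT B =====
-- the `while rest:` / `for b in rest:` loops that fill the `diffs` set
def pvDiffAcc (acc : PySem.Set Int) : List Int → PySem.Set Int
  | [] => acc
  | a :: r => pvDiffAcc ((a :: r).foldl (fun s b => PySem.Set.add s (b - a)) acc) r

-- `cands = sorted(diffs)`
def pvCands (s : List Int) : List Int :=
  PySem.List.sorted (pvDiffAcc PySem.Set.empty s) (fun x => x)

-- the inner `while k < len(rest) and k < C and rest[k] <= limit` of `_fits`: number of k-steps
def pvTakeCnt (C limit : Int) : List Int → Int → Nat
  | [], _ => 0
  | y :: ys, k => if k < C ∧ y ≤ limit then pvTakeCnt C limit ys (k + 1) + 1 else 0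

-- the outer `while rest:` of `_fits`; `rest = rest[k:]` is the drop below
def pvFits (M C W : Int) : List Int → Int → Bool
  | [], _ => true
  | x :: r, buses =>
    if buses + 1 > M then false
    else pvFits M C W (r.drop (pvTakeCnt C (x + W) r 1)) (buses + 1)
termination_by l => l.length
decreasing_by simp only [List.length_cons, List.length_drop]; omega

-- the `while lo < hi` binary search over the candidate list
def pvBsearchB (s cands : List Int) (M C lo hi : Int) : Int :=
  if h : lo < hi then
    if pvFits M C ((PySem.List.pyGet? cands (PySem.Int.floordiv (lo + hi) 2)).getD 0) s 0 then
      pvBsearchB s cands M C lo (PySem.Int.floordiv (lo + hi) 2)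
    else
      pvBsearchB s cands M C (PySem.Int.floordiv (lo + hi) 2 + 1) hi
  else lo
termination_by (hi - lo).toNat
decreasing_by
  · have h1 := pvMid_ge' lo hi h; have h2 := pvMid_lt' lo hi h; omega
  · have h1 := pvMid_ge' lo hi h; have h2 := pvMid_lt' lo hi h; omega

def min_max_waiting_alt (N : Int) (M : Int) (C : Int) (arrivals : List Int) : Int :=
  let s := PySem.List.sorted arrivals (fun x => x)
  let cands := pvCands s
  (PySem.List.pyGet? cands (pvBsearchB s cands M C 0 ((cands.length : Int) - 1))).getD 0

-- ===== PRECONDITION & SPEC =====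
-- Pre_ excludes the empty list, where A raises ValueError (max of empty sequence), and
-- nonpositive bus capacity C ≤ 0, outside the problem's natural domain, where no assignment is
-- really feasible and A's cow-by-cow count and B's partition count give different accidental answers.
def Pre_min_max_waiting (N : Int) (M : Int) (C : Int) (arrivals : List Int) : Prop :=
  arrivals ≠ [] ∧ 1 ≤ C
instance (N : Int) (M : Int) (C : Int) (arrivals : List Int) : Decidable (Pre_min_max_waiting N M C arrivals) := by unfold Pre_min_max_waiting; infer_instance

def pvWitness_min_max_waiting : Int × Int × Int × List Int := (3, 2, 2, [1, 3, 2])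

def Spec_min_max_waiting (N : Int) (M : Int) (C : Int) (arrivals : List Int) (out : Int) : Prop := out = min_max_waiting_alt N M C arrivals
instance (N : Int) (M : Int) (C : Int) (arrivals : List Int) (out : Int) : Decidable (Spec_min_max_waiting N M C arrivals out) := by unfold Spec_min_max_waiting; infer_instance

-- ===== CLAIM (what is proved, stated in full; the proofs are below) =====
def Claim_equal_min_max_waiting : Prop := ∀ (N : Int) (M : Int) (C : Int) (arrivals : List Int), Dom_min_max_waiting N M C arrivals → Pre_min_max_waiting N M C arrivals → Spec_min_max_waiting N M C arrivals (min_max_waiting N M C arrivals)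

-- ===== LEMMAS AND PROOFS =====

-- ---- the common greedy specification: one bus per recursion step ----
-- the cows boarding the current bus are dropped; `first` is the bus's first cow, `cnt` how many aboard
def pvGrp (C w first : Int) : List Int → Int → List Int
  | [], _ => []
  | y :: ys, cnt => if cnt < C ∧ y - first ≤ w then pvGrp C w first ys (cnt + 1) else y :: ys

theorem pvGrp_suffix (C w first : Int) : ∀ (l : List Int) (cnt : Int), pvGrp C w first l cnt <:+ l := by
  intro l
  induction l with
  | nil => intro cnt; simp [pvGrp]
  | cons y ys ih =>
    intro cnt
    simp only [pvGrp]
    split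
    · exact (ih (cnt + 1)).trans (List.suffix_cons y ys)
    · exact List.suffix_refl _

def pvBuses (C w : Int) : List Int → Nat
  | [] => 0
  | x :: r => pvBuses C w (pvGrp C w x r 1) + 1
termination_by l => l.length
decreasing_by
  have := (pvGrp_suffix C w x r 1).length_le
  simp only [List.length_cons]; omega

-- a later-starting bus with no more cows aboard leaves a later (shorter-suffix) remainder
theorem pvGrp_sub (C w x y : Int) (hxy : x ≤ y) :
    ∀ (r r' : List Int) (cnt cnt' : Int), r' <:+ r → cnt' ≤ cnt →
      pvGrp C w y r' cnt' <:+ pvGrp C w x r cnt := by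
  intro r
  induction r with
  | nil =>
    intro r' cnt cnt' hsuf _
    have : r' = [] := List.suffix_nil.mp hsuf
    subst this; simp [pvGrp]
  | cons z t ih =>
    intro r' cnt cnt' hsuf hc
    rcases List.suffix_cons_iff.mp hsuf with rfl | hsuf'
    · simp only [pvGrp]
      by_cases hx : cnt < C ∧ z - x ≤ w
      · rw [if_pos hx, if_pos (by constructor <;> omega : cnt' < C ∧ z - y ≤ w)]
        exact ih t (cnt + 1) (cnt' + 1) (List.suffix_refl t) (by omega)
      · rw [if_neg hx]
        exact pvGrp_suffix C w y (z :: t) cnt'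
    · simp only [pvGrp]
      by_cases hx : cnt < C ∧ z - x ≤ w
      · rw [if_pos hx]
        exact ih r' (cnt + 1) cnt' hsuf' (by omega)
      · rw [if_neg hx]
        exact ((pvGrp_suffix C w y r' cnt').trans hsuf').trans (List.suffix_cons z t)

-- a suffix of a sorted list needs no more buses than the whole list
theorem pvBuses_suffix (C w : Int) : ∀ (n : Nat) (l : List Int), l.length ≤ n →
    l.Pairwise (· ≤ ·) → ∀ l', l' <:+ l → pvBuses C w l' ≤ pvBuses C w l := by
  intro n
  induction n with
  | zero =>
    intro l hl _ l' hsuf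
    have : l = [] := List.length_eq_zero_iff.mp (by omega)
    subst this
    have : l' = [] := List.suffix_nil.mp hsuf
    subst this; exact le_refl _
  | succ n ih =>
    intro l hl hp l' hsuf
    cases l with
    | nil =>
      have : l' = [] := List.suffix_nil.mp hsuf
      subst this; exact le_refl _
    | cons x r =>
      rcases List.suffix_cons_iff.mp hsuf with rfl | hsuf'
      · exact le_refl _
      · cases l' with
        | nil => simp [pvBuses]
        | cons y r' =>
          have hy : y ∈ r := hsuf'.subset (by simp)
          have hxy : x ≤ y := (List.pairwise_cons.mp hp).1 y hy
          have hr' : r' <:+ r := (List.suffix_cons y r').trans hsuf'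
          have hsub := pvGrp_sub C w x y hxy r r' 1 1 hr' (le_refl 1)
          have hG : pvGrp C w x r 1 <:+ r := pvGrp_suffix C w x r 1
          have hGlen : (pvGrp C w x r 1).length ≤ r.length := hG.length_le
          have hGsort : (pvGrp C w x r 1).Pairwise (· ≤ ·) :=
            ((List.pairwise_cons.mp hp).2).sublist hG.sublist
          have := ih (pvGrp C w x r 1) (by simp at hl; omega) hGsort (pvGrp C w y r' 1) hsub
          rw [pvBuses, pvBuses]
          omega

-- a larger window never extends a bus less far
theorem pvGrp_mono_w (C x w w' : Int) (hw : w ≤ w') :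
    ∀ (l : List Int) (cnt : Int), pvGrp C w' x l cnt <:+ pvGrp C w x l cnt := by
  intro l
  induction l with
  | nil => intro cnt; simp [pvGrp]
  | cons y ys ih =>
    intro cnt
    simp only [pvGrp]
    by_cases h : cnt < C ∧ y - x ≤ w
    · rw [if_pos h, if_pos (by constructor <;> [exact h.1; omega] : cnt < C ∧ y - x ≤ w')]
      exact ih (cnt + 1)
    · rw [if_neg h]
      exact pvGrp_suffix C w' x (y :: ys) cnt

-- a larger window never needs more buses (on a sorted list)
theorem pvBuses_anti (C : Int) : ∀ (n : Nat) (l : List Int), l.length ≤ n →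
    l.Pairwise (· ≤ ·) → ∀ w w', w ≤ w' → pvBuses C w' l ≤ pvBuses C w l := by
  intro n
  induction n with
  | zero =>
    intro l hl _ w w' _
    have : l = [] := List.length_eq_zero_iff.mp (by omega)
    subst this; simp [pvBuses]
  | succ n ih =>
    intro l hl hp w w' hw
    cases l with
    | nil => simp [pvBuses]
    | cons x r =>
      have htail : r.Pairwise (· ≤ ·) := (List.pairwise_cons.mp hp).2
      have hG : pvGrp C w x r 1 <:+ r := pvGrp_suffix C w x r 1
      have hGsort : (pvGrp C w x r 1).Pairwise (· ≤ ·) := htail.sublist hG.sublist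
      have h1 : pvBuses C w' (pvGrp C w' x r 1) ≤ pvBuses C w' (pvGrp C w x r 1) :=
        pvBuses_suffix C w' (pvGrp C w x r 1).length (pvGrp C w x r 1) (le_refl _)
          hGsort _ (pvGrp_mono_w C x w w' hw r 1)
      have h2 : pvBuses C w' (pvGrp C w x r 1) ≤ pvBuses C w (pvGrp C w x r 1) :=
        ih (pvGrp C w x r 1) (by have := hG.length_le; simp at hl; omega) hGsort w w' hw
      rw [pvBuses, pvBuses]
      omega

-- the greedy probes the window only through differences of elements of the list
theorem pvGrp_congr (C x w w' : Int) :
    ∀ (l : List Int), (∀ z ∈ l, (z - x ≤ w) ↔ (z - x ≤ w')) →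
      ∀ cnt, pvGrp C w x l cnt = pvGrp C w' x l cnt := by
  intro l
  induction l with
  | nil => intro _ cnt; simp [pvGrp]
  | cons y ys ih =>
    intro h cnt
    simp only [pvGrp]
    by_cases hc : cnt < C ∧ y - x ≤ w
    · rw [if_pos hc, if_pos ⟨hc.1, (h y (by simp)).mp hc.2⟩]
      exact ih (fun z hz => h z (by simp [hz])) (cnt + 1)
    · rw [if_neg hc, if_neg (fun hc' => hc ⟨hc'.1, (h y (by simp)).mpr hc'.2⟩)]

theorem pvBuses_congr (C : Int) : ∀ (n : Nat) (l : List Int), l.length ≤ n →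
    ∀ w w', (∀ a b, List.Sublist [a, b] l → ((b - a ≤ w) ↔ (b - a ≤ w'))) →
      pvBuses C w l = pvBuses C w' l := by
  intro n
  induction n with
  | zero =>
    intro l hl w w' _
    have : l = [] := List.length_eq_zero_iff.mp (by omega)
    subst this; simp [pvBuses]
  | succ n ih =>
    intro l hl w w' h
    cases l with
    | nil => simp [pvBuses]
    | cons x r =>
      have hG : pvGrp C w x r 1 = pvGrp C w' x r 1 :=
        pvGrp_congr C x w w' r
          (fun z hz => by
            have : List.Sublist [x, z] (x :: r) :=
              List.cons_sublist_cons.mpr (List.singleton_sublist.mpr hz)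
            exact h x z this) 1
      have hGs : pvGrp C w x r 1 <:+ r := pvGrp_suffix C w x r 1
      rw [pvBuses, pvBuses, hG]
      congr 1
      refine ih (pvGrp C w' x r 1) ?_ w w' ?_
      · have := (pvGrp_suffix C w' x r 1).length_le; simp at hl; omega
      · intro a b hab
        exact h a b (((hab.trans (pvGrp_suffix C w' x r 1).sublist).trans
          (List.sublist_cons_self x r)))

-- ---- A's cow-by-cow loop computes the greedy bus count ----
theorem pvCowsLoop_eq (M C w : Int) : ∀ (l : List Int) (bus first inb : Int), bus ≤ M →
    pvCowsLoop M C w l bus first inb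
      = decide (bus + (pvBuses C w (pvGrp C w first l inb) : Int) ≤ M) := by
  intro l
  induction l with
  | nil =>
    intro bus first inb h
    simp [pvCowsLoop, pvGrp, pvBuses, h]
  | cons cow rest ih =>
    intro bus first inb h
    by_cases hc : inb < C ∧ cow - first ≤ w
    · have hg : pvGrp C w first (cow :: rest) inb = pvGrp C w first rest (inb + 1) := by
        simp only [pvGrp]; rw [if_pos hc]
      simp only [pvCowsLoop]
      rw [if_pos hc, if_neg (by omega : ¬ bus > M), hg]
      exact ih bus first (inb + 1) h
    · have hg : pvGrp C w first (cow :: rest) inb = cow :: rest := by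
        simp only [pvGrp]; rw [if_neg hc]
      have hb : pvBuses C w (cow :: rest) = pvBuses C w (pvGrp C w cow rest 1) + 1 := by
        rw [pvBuses]
      simp only [pvCowsLoop]
      rw [if_neg hc, hg, hb]
      by_cases hm : bus + 1 > M
      · rw [if_pos hm]
        symm; rw [decide_eq_false_iff_not]; push_cast; omega
      · rw [if_neg hm, ih (bus + 1) cow 1 (by omega)]
        rw [decide_eq_decide]; push_cast; omega

theorem pvCows_eq (M C w x : Int) (r : List Int) (hC : 1 ≤ C) (hw : 0 ≤ w) :
    pvCows (x :: r) M C w = decide ((pvBuses C w (x :: r) : Int) ≤ M) := by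
  simp only [pvCows, PySem.List.pyGet?_zero_cons, Option.getD_some, pvCowsLoop]
  rw [if_pos (by constructor <;> omega : (0:Int) < C ∧ x - x ≤ w)]
  have hb : pvBuses C w (x :: r) = pvBuses C w (pvGrp C w x r 1) + 1 := by rw [pvBuses]
  by_cases hm : (1:Int) > M
  · rw [if_pos hm, hb]
    symm; rw [decide_eq_false_iff_not]; push_cast; omega
  · rw [if_neg hm]
    simp only [zero_add]
    rw [pvCowsLoop_eq M C w r 1 x 1 (by omega), hb]
    rw [decide_eq_decide]; push_cast; omega

-- ---- B's bus-by-bus loop computes the same greedy bus count ----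
theorem pvTakeCnt_drop (C w x : Int) :
    ∀ (l : List Int) (cnt : Int), l.drop (pvTakeCnt C (x + w) l cnt) = pvGrp C w x l cnt := by
  intro l
  induction l with
  | nil => intro cnt; simp [pvTakeCnt, pvGrp]
  | cons y ys ih =>
    intro cnt
    simp only [pvTakeCnt, pvGrp]
    by_cases h : cnt < C ∧ y - x ≤ w
    · rw [if_pos (by constructor <;> omega : cnt < C ∧ y ≤ x + w), if_pos h]
      simpa using ih (cnt + 1)
    · rw [if_neg (by intro hc; exact h ⟨hc.1, by omega⟩), if_neg h]
      simp

theorem pvFits_eq (M C w : Int) : ∀ (n : Nat) (l : List Int), l.length ≤ n →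
    ∀ b : Int, b ≤ M → pvFits M C w l b = decide (b + (pvBuses C w l : Int) ≤ M) := by
  intro n
  induction n with
  | zero =>
    intro l hl b hb
    have : l = [] := List.length_eq_zero_iff.mp (by omega)
    subst this; simp [pvFits, pvBuses, hb]
  | succ n ih =>
    intro l hl b hb
    cases l with
    | nil => simp [pvFits, pvBuses, hb]
    | cons x r =>
      simp only [pvFits]
      have hb' : pvBuses C w (x :: r) = pvBuses C w (pvGrp C w x r 1) + 1 := by rw [pvBuses]
      by_cases hm : b + 1 > M
      · rw [if_pos hm, hb']
        symm; rw [decide_eq_false_iff_not]; push_cast; omega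
      · rw [if_neg hm, pvTakeCnt_drop C w x r 1,
          ih (pvGrp C w x r 1) (by have := (pvGrp_suffix C w x r 1).length_le; simp at hl; omega)
            (b + 1) (by omega), hb']
        rw [decide_eq_decide]; push_cast; omega

theorem pvFits_top (M C w x : Int) (r : List Int) :
    pvFits M C w (x :: r) 0 = decide ((pvBuses C w (x :: r) : Int) ≤ M) := by
  simp only [pvFits]
  have hb : pvBuses C w (x :: r) = pvBuses C w (pvGrp C w x r 1) + 1 := by rw [pvBuses]
  by_cases hm : (0:Int) + 1 > M
  · rw [if_pos hm, hb]
    symm; rw [decide_eq_false_iff_not]; push_cast; omega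
  · rw [if_neg hm, pvTakeCnt_drop C w x r 1]
    simp only [zero_add]
    rw [pvFits_eq M C w (pvGrp C w x r 1).length (pvGrp C w x r 1) (le_refl _) 1 (by omega), hb]
    rw [decide_eq_decide]; push_cast; omega

-- ---- the abstract binary search and its characterisation ----
def pvBS (Q : Int → Bool) (lo hi : Int) : Int :=
  if h : lo < hi then
    if Q (PySem.Int.floordiv (lo + hi) 2) then pvBS Q lo (PySem.Int.floordiv (lo + hi) 2)
    else pvBS Q (PySem.Int.floordiv (lo + hi) 2 + 1) hi
  else lo
termination_by (hi - lo).toNat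
decreasing_by
  · have h1 := pvMid_ge' lo hi h; have h2 := pvMid_lt' lo hi h; omega
  · have h1 := pvMid_ge' lo hi h; have h2 := pvMid_lt' lo hi h; omega

theorem pvBsearchA_eq (s : List Int) (M C : Int) : ∀ (n : Nat) (lo hi : Int),
    (hi - lo).toNat = n → pvBsearchA s M C lo hi = pvBS (fun w => pvCows s M C w) lo hi := by
  intro n
  induction n using Nat.strong_induction_on with
  | _ n ih =>
    intro lo hi hn
    rw [pvBsearchA, pvBS]
    by_cases h : lo < hi
    · rw [dif_pos h, dif_pos h]
      have h1 := pvMid_ge' lo hi h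
      have h2 := pvMid_lt' lo hi h
      rw [Int.add_comm hi lo]
      split
      · exact ih _ (by omega) _ _ rfl
      · exact ih _ (by omega) _ _ rfl
    · rw [dif_neg h, dif_neg h]

theorem pvBsearchB_eq (s cands : List Int) (M C : Int) : ∀ (n : Nat) (lo hi : Int),
    (hi - lo).toNat = n →
    pvBsearchB s cands M C lo hi
      = pvBS (fun i => pvFits M C ((PySem.List.pyGet? cands i).getD 0) s 0) lo hi := by
  intro n
  induction n using Nat.strong_induction_on with
  | _ n ih =>
    intro lo hi hn
    rw [pvBsearchB, pvBS]
    by_cases h : lo < hi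
    · rw [dif_pos h, dif_pos h]
      have h1 := pvMid_ge' lo hi h
      have h2 := pvMid_lt' lo hi h
      split
      · exact ih _ (by omega) _ _ rfl
      · exact ih _ (by omega) _ _ rfl
    · rw [dif_neg h, dif_neg h]

-- pvBS on a predicate monotone over [lo, hi]: bounds, minimality, and truth at the result
theorem pvBS_facts (Q : Int → Bool) : ∀ (n : Nat) (lo hi : Int), (hi - lo).toNat = n →
    lo ≤ hi → (∀ a b, lo ≤ a → a ≤ b → b ≤ hi → Q a = true → Q b = true) →
    lo ≤ pvBS Q lo hi ∧ pvBS Q lo hi ≤ hi ∧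
      (∀ w, lo ≤ w → w < pvBS Q lo hi → Q w = false) ∧
      (Q (pvBS Q lo hi) = true ∨ pvBS Q lo hi = hi) := by
  intro n
  induction n using Nat.strong_induction_on with
  | _ n ih =>
    intro lo hi hn hle hmono
    rw [pvBS]
    by_cases h : lo < hi
    · rw [dif_pos h]
      have h1 := pvMid_ge' lo hi h
      have h2 := pvMid_lt' lo hi h
      set m := PySem.Int.floordiv (lo + hi) 2 with hm
      by_cases hq : Q m = true
      · rw [if_pos hq]
        have := ih (m - lo).toNat (by omega) lo m rfl (by omega)
          (fun a b ha hab hb => hmono a b ha hab (by omega))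
        obtain ⟨f1, f2, f3, f4⟩ := this
        refine ⟨f1, by omega, f3, ?_⟩
        rcases f4 with hf | hf
        · exact Or.inl hf
        · rw [hf]; exact Or.inl hq
      · rw [if_neg (by simpa using hq)]
        have hqf : Q m = false := by
          cases hqq : Q m with
          | false => rfl
          | true => exact absurd hqq hq
        have := ih (hi - (m + 1)).toNat (by omega) (m + 1) hi rfl (by omega)
          (fun a b ha hab hb => hmono a b (by omega) hab hb)
        obtain ⟨f1, f2, f3, f4⟩ := this
        refine ⟨by omega, f2, ?_, f4⟩
        intro w hw hwlt
        by_cases hwm : w ≤ m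
        · cases hww : Q w with
          | false => rfl
          | true =>
            have := hmono w m hw hwm (by omega) hww
            rw [this] at hqf; cases hqf
        · exact f3 w (by omega) hwlt
    · rw [dif_neg h]
      exact ⟨le_refl _, by omega, fun w hw hlt => by omega, Or.inr (by omega)⟩

-- pvBS probes only inside [lo, hi]
theorem pvBS_congr (Q Q' : Int → Bool) : ∀ (n : Nat) (lo hi : Int), (hi - lo).toNat = n →
    (∀ w, lo ≤ w → w ≤ hi → Q w = Q' w) → pvBS Q lo hi = pvBS Q' lo hi := by
  intro n
  induction n using Nat.strong_induction_on with
  | _ n ih =>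
    intro lo hi hn hagree
    conv_lhs => rw [pvBS]
    conv_rhs => rw [pvBS]
    by_cases h : lo < hi
    · rw [dif_pos h, dif_pos h]
      have h1 := pvMid_ge' lo hi h
      have h2 := pvMid_lt' lo hi h
      rw [hagree _ (by omega) (by omega)]
      split
      · exact ih _ (by omega) _ _ rfl (fun w hw hw' => hagree w hw (by omega))
      · exact ih _ (by omega) _ _ rfl (fun w hw hw' => hagree w (by omega) hw')
    · rw [dif_neg h, dif_neg h]

-- ---- order facts about sorted lists ----
theorem pvPairwise_le_getLast : ∀ (l : List Int) (h : l ≠ []) (_ : l.Pairwise (· ≤ ·)),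
    ∀ y ∈ l, y ≤ l.getLast h := by
  intro l
  induction l with
  | nil => intro h; simp at h
  | cons a t ih =>
    intro h hp y hy
    cases t with
    | nil => simp at hy; simp [hy]
    | cons b u =>
      rw [List.getLast_cons (by simp)]
      rcases List.mem_cons.mp hy with rfl | hyt
      · have hab : ∀ z ∈ b :: u, y ≤ z := (List.pairwise_cons.mp hp).1
        exact le_trans (hab b (by simp)) (ih (by simp) (List.pairwise_cons.mp hp).2 b (by simp))
      · exact ih (by simp) (List.pairwise_cons.mp hp).2 y hyt

theorem pvHead_le (x : Int) (r : List Int) (hp : (x :: r).Pairwise (· ≤ ·)) :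
    ∀ y ∈ x :: r, x ≤ y := by
  intro y hy
  rcases List.mem_cons.mp hy with rfl | hyt
  · exact le_refl _
  · exact (List.pairwise_cons.mp hp).1 y hyt

theorem pvMin_eq_head (arrivals : List Int) (x : Int) (rest : List Int)
    (hs : PySem.List.sorted arrivals (fun x => x) = x :: rest) :
    PySem.List.min? (PySem.List.sorted arrivals (fun x => x)) (fun x => x) = some x := by
  cases hmin : PySem.List.min? (PySem.List.sorted arrivals (fun x => x)) (fun x => x) with
  | none =>
    rw [PySem.List.min?_eq_none_iff] at hmin
    rw [hs] at hmin; cases hmin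
  | some m =>
    have hmem := PySem.List.min?_mem hmin
    have hmin' := PySem.List.min?_isMin hmin
    have hp := PySem.List.sorted_pairwise arrivals (fun x => x)
    rw [hs] at hmem hmin' hp
    have hxm : x ≤ m := pvHead_le x rest hp m hmem
    have hmx : m ≤ x := hmin' x (by simp)
    exact congrArg some (by omega)

theorem pvMax_eq_last (arrivals : List Int) (x : Int) (rest : List Int)
    (hs : PySem.List.sorted arrivals (fun x => x) = x :: rest) :
    PySem.List.max? (PySem.List.sorted arrivals (fun x => x)) (fun x => x)
      = some ((x :: rest).getLast (by simp)) := by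
  cases hmax : PySem.List.max? (PySem.List.sorted arrivals (fun x => x)) (fun x => x) with
  | none =>
    rw [PySem.List.max?_eq_none_iff] at hmax
    rw [hs] at hmax; cases hmax
  | some m =>
    have hmem := PySem.List.max?_mem hmax
    have hmax' := PySem.List.max?_isMax hmax
    have hp := PySem.List.sorted_pairwise arrivals (fun x => x)
    rw [hs] at hmem hmax' hp
    have hpl : (x :: rest).Pairwise (· ≤ ·) := by simpa using hp
    have h1 : m ≤ (x :: rest).getLast (by simp) :=
      pvPairwise_le_getLast (x :: rest) (by simp) hpl m hmem
    have h2 : (x :: rest).getLast (by simp) ≤ m :=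
      hmax' _ (List.getLast_mem _)
    exact congrArg some (by omega)

-- ---- the candidate list ----
theorem pvMem_foldl_add (a : Int) (l : List Int) (acc : PySem.Set Int) (z : Int) :
    z ∈ l.foldl (fun s b => PySem.Set.add s (b - a)) acc ↔ z ∈ acc ∨ ∃ b ∈ l, z = b - a :=
  PySem.Set.mem_foldl_add l (fun b => b - a) acc z

theorem pvNodup_foldl_add (a : Int) : ∀ (l : List Int) (acc : PySem.Set Int), acc.Nodup →
    (l.foldl (fun s b => PySem.Set.add s (b - a)) acc).Nodup := by
  intro l
  induction l with
  | nil => intro acc h; exact h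
  | cons b t ih =>
    intro acc h
    exact ih _ (PySem.Set.nodup_add acc (b - a) h)

theorem pvMem_pvDiffAcc (z : Int) : ∀ (l : List Int) (acc : PySem.Set Int),
    z ∈ pvDiffAcc acc l
      ↔ z ∈ acc ∨ ∃ a r', (a :: r') <:+ l ∧ ∃ b ∈ a :: r', z = b - a := by
  intro l
  induction l with
  | nil =>
    intro acc
    simp only [pvDiffAcc]
    constructor
    · exact fun h => Or.inl h
    · rintro (h | ⟨a, r', hsuf, _⟩)
      · exact h
      · have := List.suffix_nil.mp hsuf; cases this
  | cons a r ih =>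
    intro acc
    simp only [pvDiffAcc]
    rw [ih, pvMem_foldl_add]
    constructor
    · rintro ((h | ⟨b, hb, rfl⟩) | ⟨a', r', hsuf, b, hb, rfl⟩)
      · exact Or.inl h
      · exact Or.inr ⟨a, r, List.suffix_refl _, b, hb, rfl⟩
      · exact Or.inr ⟨a', r', hsuf.trans (List.suffix_cons a r), b, hb, rfl⟩
    · rintro (h | ⟨a', r', hsuf, b, hb, rfl⟩)
      · exact Or.inl (Or.inl h)
      · rcases List.suffix_cons_iff.mp hsuf with heq | hsuf'
        · cases heq
          exact Or.inl (Or.inr ⟨b, hb, rfl⟩)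
        · exact Or.inr ⟨a', r', hsuf', b, hb, rfl⟩

theorem pvNodup_pvDiffAcc : ∀ (l : List Int) (acc : PySem.Set Int), acc.Nodup →
    (pvDiffAcc acc l).Nodup := by
  intro l
  induction l with
  | nil => intro acc h; exact h
  | cons a r ih =>
    intro acc h
    exact ih _ (pvNodup_foldl_add a _ acc h)

theorem pvMem_pvCands (s : List Int) (z : Int) :
    z ∈ pvCands s ↔ ∃ a r', (a :: r') <:+ s ∧ ∃ b ∈ a :: r', z = b - a := by
  unfold pvCands
  rw [PySem.List.mem_sorted, pvMem_pvDiffAcc]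
  simp [PySem.Set.empty]

theorem pvCands_pairwise_lt (s : List Int) : (pvCands s).Pairwise (· < ·) := by
  have hle : (pvCands s).Pairwise (· ≤ ·) := by
    have := PySem.List.sorted_pairwise (pvDiffAcc PySem.Set.empty s) (fun x => x)
    simpa [pvCands] using this
  have hnd : (pvCands s).Nodup := by
    have hperm := PySem.List.sorted_perm (pvDiffAcc PySem.Set.empty s) (fun x => x) false
    exact hperm.nodup_iff.mpr (pvNodup_pvDiffAcc s PySem.Set.empty (by simp [PySem.Set.empty]))
  exact (hle.and hnd).imp (fun h => lt_of_le_of_ne h.1 h.2)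

theorem pvCands_pairwise_le (s : List Int) : (pvCands s).Pairwise (· ≤ ·) :=
  (pvCands_pairwise_lt s).imp le_of_lt

theorem pvZero_mem_pvCands (x : Int) (r : List Int) : (0:Int) ∈ pvCands (x :: r) := by
  rw [pvMem_pvCands]
  exact ⟨x, r, List.suffix_refl _, x, by simp, by omega⟩

theorem pvCands_nonneg (s : List Int) (hp : s.Pairwise (· ≤ ·)) :
    ∀ z ∈ pvCands s, 0 ≤ z := by
  intro z hz
  rw [pvMem_pvCands] at hz
  obtain ⟨a, r', hsuf, b, hb, rfl⟩ := hz
  have hpair : (a :: r').Pairwise (· ≤ ·) := hp.sublist hsuf.sublist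
  have := pvHead_le a r' hpair b hb
  omega

theorem pvCands_le_high (x : Int) (r : List Int) (hp : (x :: r).Pairwise (· ≤ ·)) :
    ∀ z ∈ pvCands (x :: r), z ≤ (x :: r).getLast (by simp) - x := by
  intro z hz
  rw [pvMem_pvCands] at hz
  obtain ⟨a, r', hsuf, b, hb, rfl⟩ := hz
  have ha : a ∈ x :: r := hsuf.subset (by simp)
  have hbmem : b ∈ x :: r := hsuf.subset hb
  have h1 : x ≤ a := pvHead_le x r hp a ha
  have h2 : b ≤ (x :: r).getLast (by simp) := pvPairwise_le_getLast _ (by simp) hp b hbmem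
  omega

theorem pvHigh_mem_pvCands (x : Int) (r : List Int) :
    (x :: r).getLast (by simp) - x ∈ pvCands (x :: r) := by
  rw [pvMem_pvCands]
  exact ⟨x, r, List.suffix_refl _, (x :: r).getLast (by simp), List.getLast_mem _, rfl⟩

-- an ordered pair taken anywhere in s yields a candidate
theorem pvSublist_pair_suffix (a b : Int) : ∀ (s : List Int),
    List.Sublist [a, b] s → ∃ v, (a :: v) <:+ s ∧ b ∈ v := by
  intro s
  induction s with
  | nil => intro h; cases h
  | cons c t ih =>
    intro h
    cases h with
    | cons _ h2 =>
      obtain ⟨v, hsuf, hb⟩ := ih h2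
      exact ⟨v, hsuf.trans (List.suffix_cons c t), hb⟩
    | cons₂ _ h2 =>
      exact ⟨t, List.suffix_refl _, List.singleton_sublist.mp h2⟩

theorem pvPairDiff_mem (s : List Int) (a b : Int) (h : List.Sublist [a, b] s) :
    b - a ∈ pvCands s := by
  obtain ⟨v, hsuf, hb⟩ := pvSublist_pair_suffix a b s h
  rw [pvMem_pvCands]
  exact ⟨a, v, hsuf, b, by simp [hb], rfl⟩

-- ---- assembling the equivalence on the sorted list ----
-- the feasibility predicate both programs decide
theorem pvP_mono (s : List Int) (hp : s.Pairwise (· ≤ ·)) (M C a b : Int) (hab : a ≤ b)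
    (h : decide ((pvBuses C a s : Int) ≤ M) = true) :
    decide ((pvBuses C b s : Int) ≤ M) = true := by
  rw [decide_eq_true_iff] at h ⊢
  have := pvBuses_anti C s.length s (le_refl _) hp a b hab
  omega

-- stepping down to the largest candidate below a feasible window keeps it feasible
theorem pvP_step (s : List Int) (hp : s.Pairwise (· ≤ ·)) (M C a fc : Int)
    (hfc_le : fc ≤ a) (hfc_max : ∀ z ∈ pvCands s, z ≤ a → z ≤ fc)
    (h : decide ((pvBuses C a s : Int) ≤ M) = true) :
    decide ((pvBuses C fc s : Int) ≤ M) = true := by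
  have hcongr : pvBuses C a s = pvBuses C fc s := by
    refine pvBuses_congr C s.length s (le_refl _) a fc ?_
    intro u v huv
    have hm : v - u ∈ pvCands s := pvPairDiff_mem s u v huv
    constructor
    · intro hle; exact hfc_max _ hm hle
    · intro hle; omega
  rw [← hcongr]; exact h

-- ===== VERDICT (by name: the statement is the Claim_ definition above) =====
theorem min_max_waiting_spec : Claim_equal_min_max_waiting := by
  intro N M C arrivals hdom hpre
  obtain ⟨hne, hC⟩ := hpre
  unfold Spec_min_max_waiting
  obtain ⟨x, r, hs⟩ : ∃ x r, PySem.List.sorted arrivals (fun x => x) = x :: r := by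
    cases h : PySem.List.sorted arrivals (fun x => x) with
    | nil => rw [PySem.List.sorted_eq_nil_iff] at h; exact absurd h hne
    | cons a t => exact ⟨a, t, rfl⟩
  have hp : (x :: r).Pairwise (· ≤ ·) := by
    have := PySem.List.sorted_pairwise arrivals (fun x => x)
    rw [hs] at this; simpa using this
  -- abbreviations
  set cl := pvCands (x :: r) with hcdef
  have hne' : (x :: r) ≠ [] := by simp
  set H := (x :: r).getLast hne' - x with hHdef
  set P : Int → Bool := fun w => decide ((pvBuses C w (x :: r) : Int) ≤ M) with hPdef
  -- sides, rewritten to the binary searches on the sorted list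
  have hA : min_max_waiting N M C arrivals = pvBS P 0 H := by
    show pvBsearchA (PySem.List.sorted arrivals (fun x => x)) M C 0
        (((PySem.List.max? (PySem.List.sorted arrivals (fun x => x)) (fun x => x)).getD 0)
          - ((PySem.List.min? (PySem.List.sorted arrivals (fun x => x)) (fun x => x)).getD 0))
      = pvBS P 0 H
    rw [pvMax_eq_last arrivals x r hs, pvMin_eq_head arrivals x r hs, hs]
    simp only [Option.getD_some]
    rw [pvBsearchA_eq (x :: r) M C _ 0 _ rfl]
    refine pvBS_congr _ _ _ 0 _ rfl ?_
    intro w hw _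
    exact pvCows_eq M C w x r hC hw
  set Qb : Int → Bool := fun i => pvFits M C ((PySem.List.pyGet? cl i).getD 0) (x :: r) 0
    with hQbdef
  have hB : min_max_waiting_alt N M C arrivals
      = (PySem.List.pyGet? cl (pvBS Qb 0 ((cl.length : Int) - 1))).getD 0 := by
    show (PySem.List.pyGet? (pvCands (PySem.List.sorted arrivals (fun x => x)))
        (pvBsearchB (PySem.List.sorted arrivals (fun x => x))
          (pvCands (PySem.List.sorted arrivals (fun x => x))) M C 0
          (((pvCands (PySem.List.sorted arrivals (fun x => x))).length : Int) - 1))).getD 0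
      = _
    rw [hs]
    rw [pvBsearchB_eq (x :: r) (pvCands (x :: r)) M C _ 0 _ rfl]
  rw [hA, hB]
  -- candidate-list facts
  have hcne : cl ≠ [] := by
    intro h
    have h0 := pvZero_mem_pvCands x r
    rw [← hcdef, h] at h0
    cases h0
  have hLc : 1 ≤ cl.length := List.length_pos_of_ne_nil hcne
  have hc_le : cl.Pairwise (· ≤ ·) := pvCands_pairwise_le (x :: r)
  have hlastH : cl.getLast hcne = H := by
    have h1 : cl.getLast hcne ∈ cl := List.getLast_mem _
    have h2 : cl.getLast hcne ≤ H := pvCands_le_high x r hp _ h1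
    have h3 : H ≤ cl.getLast hcne :=
      pvPairwise_le_getLast cl hcne hc_le H (pvHigh_mem_pvCands x r)
    omega
  have hH0 : 0 ≤ H := by
    have := pvHead_le x r hp ((x :: r).getLast hne') (List.getLast_mem _)
    omega
  -- indexing view of the candidate list
  have hvget : ∀ i : Int, 0 ≤ i → i ≤ (cl.length : Int) - 1 →
      ∃ h : i.toNat < cl.length, (PySem.List.pyGet? cl i).getD 0 = cl[i.toNat] := by
    intro i h0 h1
    have hlt : i.toNat < cl.length := by omega
    refine ⟨hlt, ?_⟩
    rw [PySem.List.pyGet?_eq_some_getElem cl h0 (by omega)]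
    rfl
  have hv_mem : ∀ i : Int, 0 ≤ i → i ≤ (cl.length : Int) - 1 →
      (PySem.List.pyGet? cl i).getD 0 ∈ cl := by
    intro i h0 h1
    obtain ⟨hlt, hv⟩ := hvget i h0 h1
    rw [hv]
    exact List.getElem_mem hlt
  have hgemono : ∀ (p q : Nat) (hpq : p ≤ q) (hq : q < cl.length), cl[p]'(by omega) ≤ cl[q] := by
    intro p q hpq hq
    rcases Nat.lt_or_ge p q with h | h
    · exact (List.pairwise_iff_getElem.mp hc_le) p q (by omega) hq h
    · have : p = q := by omega
      subst this; exact le_refl _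
  have hv_mono : ∀ i j : Int, 0 ≤ i → i ≤ j → j ≤ (cl.length : Int) - 1 →
      (PySem.List.pyGet? cl i).getD 0 ≤ (PySem.List.pyGet? cl j).getD 0 := by
    intro i j h0 hij h1
    obtain ⟨hi, hvi⟩ := hvget i h0 (by omega)
    obtain ⟨hj, hvj⟩ := hvget j (by omega) h1
    rw [hvi, hvj]
    exact hgemono i.toNat j.toNat (by omega) hj
  have hv_last : (PySem.List.pyGet? cl ((cl.length : Int) - 1)).getD 0 = H := by
    obtain ⟨hlt, hv⟩ := hvget ((cl.length : Int) - 1) (by omega) (le_refl _)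
    rw [hv, ← hlastH, List.getLast_eq_getElem]
    congr 1
    omega
  -- both predicates compute P
  have hQbP : ∀ i : Int, Qb i = P ((PySem.List.pyGet? cl i).getD 0) := by
    intro i
    exact pvFits_top M C _ x r
  have hPmono : ∀ a b : Int, a ≤ b → P a = true → P b = true := by
    intro a b hab h
    exact pvP_mono (x :: r) hp M C a b hab h
  -- run the two searches
  obtain ⟨fA1, fA2, fA3, fA4⟩ := pvBS_facts P (H - 0).toNat 0 H rfl hH0
    (fun a b _ hab _ h => hPmono a b hab h)
  obtain ⟨fB1, fB2, fB3, fB4⟩ := pvBS_facts Qb ((((cl.length : Int) - 1) - 0).toNat) 0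
    ((cl.length : Int) - 1) rfl (by omega)
    (fun a b ha hab hb h => by
      rw [hQbP] at h ⊢
      exact hPmono _ _ (hv_mono a b ha hab hb) h)
  set resA := pvBS P 0 H with hresA
  set I := pvBS Qb 0 ((cl.length : Int) - 1) with hI
  set vI := (PySem.List.pyGet? cl I).getD 0 with hvI
  have hvImem : vI ∈ cl := hv_mem I fB1 fB2
  have hvI0 : 0 ≤ vI := pvCands_nonneg (x :: r) hp vI hvImem
  have hvIH : vI ≤ H := pvCands_le_high x r hp vI hvImem
  by_cases hPH : P H = true
  · -- the least feasible window; both searches land on it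
    have hPresA : P resA = true := by
      rcases fA4 with h | h
      · exact h
      · rw [h]; exact hPH
    have hPvI : P vI = true := by
      rcases fB4 with h | h
      · rw [hQbP] at h; exact h
      · rw [hvI, h, hv_last]; exact hPH
    have h1 : resA ≤ vI := by
      by_contra hlt
      have := fA3 vI hvI0 (by omega)
      rw [hPvI] at this; cases this
    have h2 : vI ≤ resA := by
      -- the largest candidate ≤ resA is feasible and sits at an index ≥ I
      obtain ⟨fc, hfc_mem, hfc_le, hfc_max⟩ :
          ∃ fc, fc ∈ cl ∧ fc ≤ resA ∧ ∀ z ∈ cl, z ≤ resA → z ≤ fc := by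
        cases hmx : PySem.List.max? (cl.filter fun z => decide (z ≤ resA)) (fun z => z) with
        | none =>
          rw [PySem.List.max?_eq_none_iff] at hmx
          exfalso
          have h0 : (0:Int) ∈ cl.filter fun z => decide (z ≤ resA) := by
            rw [List.mem_filter]
            exact ⟨by rw [hcdef]; exact pvZero_mem_pvCands x r, by simpa using fA1⟩
          rw [hmx] at h0; cases h0
        | some m =>
          have hmem := PySem.List.max?_mem hmx
          have hmax := PySem.List.max?_isMax hmx
          rw [List.mem_filter] at hmem
          refine ⟨m, hmem.1, by simpa using hmem.2, ?_⟩
          intro z hz hzle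
          have := hmax z (List.mem_filter.mpr ⟨hz, by simpa using hzle⟩)
          simpa using this
      have hPfc : P fc = true :=
        pvP_step (x :: r) hp M C resA fc hfc_le
          (fun z hz hzle => hfc_max z hz hzle) hPresA
      -- fc = cl[j]; j cannot be below I
      obtain ⟨j, hj, hje⟩ := List.mem_iff_getElem.mp hfc_mem
      have hvj : (PySem.List.pyGet? cl ((j : Nat) : Int)).getD 0 = fc := by
        obtain ⟨hlt, hv⟩ := hvget (j : Int) (by omega) (by omega)
        rw [hv, ← hje]
        simp
      by_contra hgt
      -- then fc ≤ resA < vI, so index j < I, so P fc = false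
      have hfclt : fc < vI := by omega
      have hjI : (j : Int) < I := by
        by_contra hge
        have := hv_mono I (j : Int) fB1 (by omega) (by omega)
        rw [hvj] at this
        omega
      have := fB3 (j : Int) (by omega) hjI
      rw [hQbP, hvj, hPfc] at this
      cases this
    omega
  · -- no feasible window at all: both return the top of their ranges
    have hPH' : P H = false := by
      cases h : P H with
      | false => rfl
      | true => exact absurd h hPH
    have hresAH : resA = H := by
      rcases fA4 with h | h
      · exfalso
        have := hPmono resA H fA2 h
        rw [hPH'] at this; cases this
      · exact h
    have hIeq : I = (cl.length : Int) - 1 := by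
      rcases fB4 with h | h
      · exfalso
        rw [hQbP] at h
        have := hPmono vI H hvIH h
        rw [hPH'] at this; cases this
      · exact h
    rw [hresAH, hvI, hIeq, hv_last]
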